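-- pv_equiv track=rewrite | github.com/AngheloAlf/puzzle_collection_dwarf | split.py | set_anonymous_enums
-- ===== SOURCE A (Python) =====
-- def set_anonymous_enums(contents: list[str], enums_by_contents: dict[str, str]) -> list[str]:
--     new_contents: list[str] = []
--
--     trailing_line: str|None = None
--     current_enum_contents: list[str] = []
--     for line in contents:
--         if trailing_line is not None:
--             if "}" in line:
--                 body = "".join(current_enum_contents)
--                 current_enum_name = enums_by_contents.get(body)
--                 assert current_enum_name is not None, body
--
--                 new_line = trailing_line + current_enum_name + "}".join(line.split("}")[1:])
--                 new_contents.append(new_line)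
--
--                 trailing_line = None
--                 current_enum_contents.clear()
--                 continue
--             current_enum_contents.append(line.strip())
--         else:
--             if "enum /* @" not in line:
--                 new_contents.append(line)
--                 continue
--             trailing_line = line.split("enum /* ")[0]
--
--     return new_contents
-- ===== SOURCE B (Python) =====
-- def _find(lines, needle, start):
--     """Index of first line at or after `start` containing `needle`, else None."""
--     for i in range(start, len(lines)):
--         if needle in lines[i]:
--             return i
--     return None
--
--
-- def _parse(contents):
--     """Stage 1: cut the file into segments by searching for markers and slicing.
--
--     A segment is either ("line", text) or ("enum", prefix, joined_body, closing_line).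
--     An enum block whose closing line is missing is dropped (as the original does).
--     """
--     segments = []
--     pos = 0
--     while True:
--         i = _find(contents, "enum /* @", pos)
--         if i is None:
--             segments.extend(("line", l) for l in contents[pos:])
--             return segments
--         segments.extend(("line", l) for l in contents[pos:i])
--         j = _find(contents, "}", i + 1)
--         if j is None:
--             return segments
--         segments.append(("enum",
--                          contents[i].split("enum /* ")[0],
--                          "".join(l.strip() for l in contents[i + 1:j]),
--                          contents[j]))
--         pos = j + 1
--
--
-- def set_anonymous_enums(contents: list[str], enums_by_contents: dict[str, str]) -> list[str]:
--     # Stage 2: render each segment.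
--     out = []
--     for seg in _parse(contents):
--         if seg[0] == "line":
--             out.append(seg[1])
--         else:
--             _, prefix, body, closing = seg
--             out.append(prefix + enums_by_contents[body] + "}".join(closing.split("}")[1:]))
--     return out
-- ===== Notes on version B (the rewrite author's own statement) =====
-- stated objective: alternative
-- what changed: A's single-pass per-line state machine (trailing_line flag plus mutable body accumulator) is replaced by a staged parse-then-render pipeline: stage 1 locates enum markers and closing braces by index search and slices the file into an intermediate segment list (plain lines / (prefix, body, closing) blocks), stage 2 renders each segment; same O(n) cost, different data flow and decomposition.
-- outside the precondition, e.g. on set_anonymous_enums(['enum /* @x */ {', 'A,', '};'], {}): A raises AssertionError, B raises KeyError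
import Mathlib
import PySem

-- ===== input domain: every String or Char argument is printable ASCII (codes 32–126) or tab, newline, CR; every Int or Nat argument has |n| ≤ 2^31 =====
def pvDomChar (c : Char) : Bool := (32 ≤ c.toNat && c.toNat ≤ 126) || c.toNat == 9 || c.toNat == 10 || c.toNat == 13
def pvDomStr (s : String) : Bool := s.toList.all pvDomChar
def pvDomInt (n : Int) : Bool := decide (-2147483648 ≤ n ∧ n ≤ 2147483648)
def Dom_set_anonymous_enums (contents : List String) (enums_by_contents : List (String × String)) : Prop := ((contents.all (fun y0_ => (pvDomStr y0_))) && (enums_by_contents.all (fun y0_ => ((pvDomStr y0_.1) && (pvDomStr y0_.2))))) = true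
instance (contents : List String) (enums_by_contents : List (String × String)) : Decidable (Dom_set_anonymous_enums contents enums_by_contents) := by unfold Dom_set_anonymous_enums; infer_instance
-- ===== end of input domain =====

-- B replaces A's one-pass per-line state machine by a staged parse-then-render pipeline
-- (index search + slicing into an intermediate segment list, then rendering); objective: alternative decomposition.

-- ===== PORT A =====
-- s.split(sep) for a nonempty literal sep (exact: PySem.Chars.splitOn on the code points)
def pvSplit (s sep : String) : List String :=
  (PySem.Chars.splitOn s.toList sep.toList).map String.ofList

-- state machine: (remaining lines, trailing_line, current_enum_contents); output built by cons
def pvAGo (d : PySem.Dict String String) : List String → Option String → List String → List String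
  | [], _, _ => []
  | line :: rest, some tl, cur =>
      if PySem.Str.isIn "}" line then
        match d.get? (PySem.Str.join "" cur) with
        | some name =>
            (tl ++ name ++ PySem.Str.join "}" ((pvSplit line "}").drop 1))
              :: pvAGo d rest none []
        | none => []   -- Python: assert fails (AssertionError); excluded by Pre_
      else pvAGo d rest (some tl) (cur ++ [PySem.Str.strip line])
  | line :: rest, none, cur =>
      if PySem.Str.isIn "enum /* @" line then
        pvAGo d rest (some ((pvSplit line "enum /* ").headD "")) cur
      else line :: pvAGo d rest none cur

def set_anonymous_enums (contents : List String) (enums_by_contents : List (String × String)) : List String :=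
  pvAGo (PySem.Dict.ofList enums_by_contents) contents none []

-- ===== PORT B =====
-- a parsed segment: a plain line, or an enum block (prefix, joined body, closing line)
inductive PvSeg
  | line : String → PvSeg
  | enum : String → String → String → PvSeg
deriving DecidableEq, Repr

-- _find's for-loop over range(start, len): walk the suffix, carrying the absolute index
def pvFindGo (needle : String) : List String → Nat → Option Nat
  | [], _ => none
  | l :: rest, i => if PySem.Str.isIn needle l then some i else pvFindGo needle rest (i + 1)

-- _find(lines, needle, start)
def pvFind (lines : List String) (needle : String) (start : Nat) : Option Nat :=
  pvFindGo needle (lines.drop start) start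

theorem pvFindGo_bounds (needle : String) :
    ∀ (xs : List String) (i k : Nat), pvFindGo needle xs i = some k → i ≤ k ∧ k < i + xs.length := by
  intro xs
  induction xs with
  | nil => intro i k h; simp [pvFindGo] at h
  | cons l rest ih =>
    intro i k h
    simp only [pvFindGo] at h
    split at h
    · cases h; simp
    · have := ih (i + 1) k h; simp; omega

theorem pvFind_bounds {lines : List String} {needle : String} {start k : Nat}
    (h : pvFind lines needle start = some k) : start ≤ k ∧ k < lines.length := by
  have := pvFindGo_bounds needle (lines.drop start) start k h
  simp [List.length_drop] at this
  omega

-- _parse's while loop: pos is the current cursor; contents[a:b] = (take b).drop a (0 ≤ a ≤ b here)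
def pvParseGo (contents : List String) : Nat → List PvSeg
  | pos =>
    match h1 : pvFind contents "enum /* @" pos with
    | none => (contents.drop pos).map PvSeg.line
    | some i =>
      match h2 : pvFind contents "}" (i + 1) with
      | none => ((contents.take i).drop pos).map PvSeg.line
      | some j =>
        ((contents.take i).drop pos).map PvSeg.line
          ++ PvSeg.enum ((pvSplit (contents[i]?.getD "") "enum /* ").headD "")
                        (PySem.Str.join "" (((contents.take j).drop (i + 1)).map PySem.Str.strip))
                        (contents[j]?.getD "")
            :: pvParseGo contents (j + 1)
  termination_by pos => contents.length - pos
  decreasing_by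
    have hb1 := pvFind_bounds h1
    have hb2 := pvFind_bounds h2
    omega

-- stage 2: render each segment
def pvRender (d : PySem.Dict String String) : List PvSeg → List String
  | [] => []
  | PvSeg.line l :: s => l :: pvRender d s
  | PvSeg.enum p b c :: s =>
      match d.get? b with
      | some name => (p ++ name ++ PySem.Str.join "}" ((pvSplit c "}").drop 1)) :: pvRender d s
      | none => []   -- Python: KeyError; excluded by Pre_

def set_anonymous_enums_alt (contents : List String) (enums_by_contents : List (String × String)) : List String :=
  pvRender (PySem.Dict.ofList enums_by_contents) (pvParseGo contents 0)

-- ===== PRECONDITION & SPEC =====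
-- the joined bodies of the terminated anonymous-enum blocks of the file, in order
-- (structural scan: 'some acc' = inside an enum block with stripped lines acc collected so far)
def pvBodiesGo : List String → Option (List String) → List String
  | [], _ => []
  | line :: rest, some acc =>
      if PySem.Str.isIn "}" line then PySem.Str.join "" acc :: pvBodiesGo rest none
      else pvBodiesGo rest (some (acc ++ [PySem.Str.strip line]))
  | line :: rest, none =>
      if PySem.Str.isIn "enum /* @" line then pvBodiesGo rest (some [])
      else pvBodiesGo rest none

def pvBodies (xs : List String) : List String := pvBodiesGo xs none

-- Pre_ excludes exactly the inputs on which A raises AssertionError: a terminated anonymous-enum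
-- block whose joined body is not a key of enums_by_contents (B raises KeyError there).
def Pre_set_anonymous_enums (contents : List String) (enums_by_contents : List (String × String)) : Prop :=
  ∀ b ∈ pvBodies contents, (PySem.Dict.ofList enums_by_contents).contains b = true
instance (contents : List String) (enums_by_contents : List (String × String)) : Decidable (Pre_set_anonymous_enums contents enums_by_contents) := by unfold Pre_set_anonymous_enums; infer_instance

def pvWitness_set_anonymous_enums : List String × (List (String × String)) :=
  (["enum /* @a */ {", "A,", "};"], [("A,", "E")])

def Spec_set_anonymous_enums (contents : List String) (enums_by_contents : List (String × String)) (out : List String) : Prop := out = set_anonymous_enums_alt contents enums_by_contents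
instance (contents : List String) (enums_by_contents : List (String × String)) (out : List String) : Decidable (Spec_set_anonymous_enums contents enums_by_contents out) := by unfold Spec_set_anonymous_enums; infer_instance

-- ===== CLAIM (what is proved, stated in full; the proofs are below) =====
def Claim_equal_set_anonymous_enums : Prop := ∀ (contents : List String) (enums_by_contents : List (String × String)), Dom_set_anonymous_enums contents enums_by_contents → Pre_set_anonymous_enums contents enums_by_contents → Spec_set_anonymous_enums contents enums_by_contents (set_anonymous_enums contents enums_by_contents)

-- ===== LEMMAS AND PROOFS =====

-- proof-only helper: the inner collection behaviour of A's state machine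
def pvCollect : List String → List String → Option (List String × String × List String)
  | [], _ => none
  | line :: rest, acc =>
      if PySem.Str.isIn "}" line then some (acc, line, rest)
      else pvCollect rest (acc ++ [PySem.Str.strip line])

-- pvCollect characterised through findIdx?
theorem pvCollect_none :
    ∀ (xs acc : List String), xs.findIdx? (fun l => PySem.Str.isIn "}" l) = none →
    pvCollect xs acc = none := by
  intro xs
  induction xs with
  | nil => intro acc _; rfl
  | cons l rest ih =>
    intro acc h
    rw [List.findIdx?_cons] at h
    simp only [pvCollect, PySem.Str.isIn] at *
    split at h
    · simp at h
    · next hl =>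
      rw [if_neg hl]
      simp only [Option.map_eq_none_iff] at h
      exact ih _ h

theorem pvCollect_some :
    ∀ (xs : List String) (j : Nat) (acc : List String),
    xs.findIdx? (fun l => PySem.Str.isIn "}" l) = some j →
    pvCollect xs acc = some (acc ++ (xs.take j).map PySem.Str.strip, (xs[j]?).getD "", xs.drop (j + 1)) := by
  intro xs
  induction xs with
  | nil => intro j acc h; simp at h
  | cons l rest ih =>
    intro j acc h
    rw [List.findIdx?_cons] at h
    simp only [pvCollect, PySem.Str.isIn] at *
    split at h
    · next hl =>
      simp at h
      subst h
      rw [if_pos hl]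
      simp
    · next hl =>
      simp only [Option.map_eq_some_iff] at h
      obtain ⟨j', hj', rfl⟩ := h
      rw [if_neg hl, ih j' _ hj']
      simp

-- A's trailing-line state is exactly the collection loop
theorem pvAGo_some (d : PySem.Dict String String) :
    ∀ (xs : List String) (tl : String) (cur : List String),
    pvAGo d xs (some tl) cur =
      match pvCollect xs cur with
      | some (body, closing, rest') =>
          match d.get? (PySem.Str.join "" body) with
          | some name =>
              (tl ++ name ++ PySem.Str.join "}" ((pvSplit closing "}").drop 1))
                :: pvAGo d rest' none []
          | none => []
      | none => [] := by
  intro xs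
  induction xs with
  | nil => intro tl cur; simp [pvAGo, pvCollect]
  | cons line rest ih =>
    intro tl cur
    simp only [pvAGo, pvCollect]
    split
    · rfl
    · exact ih tl _

-- pvBodies through pvCollect
theorem pvBodiesGo_some :
    ∀ (xs acc : List String),
    pvBodiesGo xs (some acc) =
      match pvCollect xs acc with
      | some (body, _, rest') => PySem.Str.join "" body :: pvBodiesGo rest' none
      | none => [] := by
  intro xs
  induction xs with
  | nil => intro acc; simp [pvBodiesGo, pvCollect]
  | cons line rest ih =>
    intro acc
    simp only [pvBodiesGo, pvCollect]
    split
    · rfl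
    · exact ih _

theorem pvBodies_enum {line : String} {rest body : List String} {closing : String}
    {rest' : List String}
    (henum : PySem.Str.isIn "enum /* @" line = true)
    (hc : pvCollect rest [] = some (body, closing, rest')) :
    pvBodies (line :: rest) = PySem.Str.join "" body :: pvBodies rest' := by
  unfold pvBodies
  rw [pvBodiesGo.eq_def]
  dsimp only
  rw [if_pos henum, pvBodiesGo_some, hc]

theorem pvBodies_notenum {line : String} {rest : List String}
    (henum : ¬ PySem.Str.isIn "enum /* @" line = true) :
    pvBodies (line :: rest) = pvBodies rest := by
  unfold pvBodies
  rw [pvBodiesGo.eq_def]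
  dsimp only
  rw [if_neg henum]

-- pvFind through findIdx? on the suffix
theorem pvFindGo_eq (needle : String) :
    ∀ (xs : List String) (i : Nat),
    pvFindGo needle xs i = (xs.findIdx? (fun l => PySem.Str.isIn needle l)).map (i + ·) := by
  intro xs
  induction xs with
  | nil => intro i; simp [pvFindGo]
  | cons l rest ih =>
    intro i
    rw [List.findIdx?_cons]
    simp only [pvFindGo, PySem.Str.isIn]
    split
    · simp
    · rw [ih]
      cases h : List.findIdx? (fun l => PySem.Chars.isIn needle.toList l.toList) rest
      · simp [h]
      · simp [h]; omega

theorem pvFind_eq (lines : List String) (needle : String) (start : Nat) :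
    pvFind lines needle start
      = ((lines.drop start).findIdx? (fun l => PySem.Str.isIn needle l)).map (start + ·) :=
  pvFindGo_eq needle _ start

-- proof-only structural version of the parser on a suffix list
def pvParseL : List String → List PvSeg
  | xs =>
    match xs.findIdx? (fun l => PySem.Str.isIn "enum /* @" l) with
    | none => xs.map PvSeg.line
    | some i =>
      match h2 : (xs.drop (i + 1)).findIdx? (fun l => PySem.Str.isIn "}" l) with
      | none => (xs.take i).map PvSeg.line
      | some j =>
        (xs.take i).map PvSeg.line
          ++ PvSeg.enum ((pvSplit (xs[i]?.getD "") "enum /* ").headD "")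
                        (PySem.Str.join "" (((xs.drop (i + 1)).take j).map PySem.Str.strip))
                        ((xs.drop (i + 1))[j]?.getD "")
            :: pvParseL ((xs.drop (i + 1)).drop (j + 1))
  termination_by xs => xs.length
  decreasing_by
    have hle : i + 1 ≤ xs.length := by
      by_contra hlt
      have hnil : xs.drop (i + 1) = [] := by
        apply List.drop_eq_nil_of_le; omega
      rw [hnil] at h2
      simp at h2
    have hgoal : ((xs.drop (i + 1)).drop (j + 1)).length < xs.length := by
      simp only [List.length_drop]; omega
    exact hgoal

-- unfolding lemmas for pvParseL
theorem pvParseL_none {xs : List String}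
    (h1 : xs.findIdx? (fun l => PySem.Str.isIn "enum /* @" l) = none) :
    pvParseL xs = xs.map PvSeg.line := by
  rw [pvParseL.eq_def]
  dsimp only
  rw [h1]

theorem pvParseL_some_none {xs : List String} {i : Nat}
    (h1 : xs.findIdx? (fun l => PySem.Str.isIn "enum /* @" l) = some i)
    (h2 : (xs.drop (i + 1)).findIdx? (fun l => PySem.Str.isIn "}" l) = none) :
    pvParseL xs = (xs.take i).map PvSeg.line := by
  rw [pvParseL.eq_def]
  dsimp only
  rw [h1]
  dsimp only
  rw [h2]

theorem pvParseL_some_some {xs : List String} {i j : Nat}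
    (h1 : xs.findIdx? (fun l => PySem.Str.isIn "enum /* @" l) = some i)
    (h2 : (xs.drop (i + 1)).findIdx? (fun l => PySem.Str.isIn "}" l) = some j) :
    pvParseL xs =
      (xs.take i).map PvSeg.line
        ++ PvSeg.enum ((pvSplit (xs[i]?.getD "") "enum /* ").headD "")
                      (PySem.Str.join "" (((xs.drop (i + 1)).take j).map PySem.Str.strip))
                      ((xs.drop (i + 1))[j]?.getD "")
          :: pvParseL ((xs.drop (i + 1)).drop (j + 1)) := by
  rw [pvParseL.eq_def]
  dsimp only
  rw [h1]
  dsimp only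
  rw [h2]

-- pvParseL on a non-marker head peels one plain line
theorem pvParseL_cons_not {x : String} {rest : List String}
    (hx : ¬ PySem.Str.isIn "enum /* @" x = true) :
    pvParseL (x :: rest) = PvSeg.line x :: pvParseL rest := by
  have h1 : (x :: rest).findIdx? (fun l => PySem.Str.isIn "enum /* @" l)
      = (rest.findIdx? (fun l => PySem.Str.isIn "enum /* @" l)).map (· + 1) := by
    rw [List.findIdx?_cons, if_neg hx]
  cases hm : rest.findIdx? (fun l => PySem.Str.isIn "enum /* @" l) with
  | none =>
    rw [pvParseL_none (xs := x :: rest) (by rw [h1, hm]; rfl), pvParseL_none hm]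
    simp
  | some i =>
    cases hb : (rest.drop (i + 1)).findIdx? (fun l => PySem.Str.isIn "}" l) with
    | none =>
      rw [pvParseL_some_none (xs := x :: rest) (i := i + 1) (by rw [h1, hm]; rfl)
            (by simpa using hb),
          pvParseL_some_none hm hb]
      simp
    | some j =>
      rw [pvParseL_some_some (xs := x :: rest) (i := i + 1) (j := j) (by rw [h1, hm]; rfl)
            (by simpa using hb),
          pvParseL_some_some hm hb]
      simp

-- pvParseGo at cursor pos is pvParseL of the suffix (fuel = how far the cursor still has to travel)
theorem pvParseGo_eq_parseL_fuel (contents : List String) :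
    ∀ (k pos : Nat), contents.length - pos ≤ k →
    pvParseGo contents pos = pvParseL (contents.drop pos) := by
  intro k
  induction k with
  | zero =>
    intro pos hk
    rw [pvParseGo.eq_def]
    dsimp only
    split
    · next h1 =>
      rw [pvFind_eq] at h1
      simp only [Option.map_eq_none_iff] at h1
      rw [pvParseL_none (xs := contents.drop pos) h1]
    · next i h1 =>
      exfalso
      have := pvFind_bounds h1
      omega
  | succ k ih =>
    intro pos hk
    rw [pvParseGo.eq_def]
    dsimp only
    split
    · next h1 =>
      rw [pvFind_eq] at h1
      simp only [Option.map_eq_none_iff] at h1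
      rw [pvParseL_none (xs := contents.drop pos) h1]
    · next i h1 =>
      have hb1 := pvFind_bounds h1
      split
      · next h2 =>
        rw [pvFind_eq] at h1 h2
        simp only [Option.map_eq_some_iff] at h1
        obtain ⟨i', hi', rfl⟩ := h1
        simp only [Option.map_eq_none_iff] at h2
        have hdd : (contents.drop pos).drop (i' + 1) = contents.drop (pos + i' + 1) := by
          rw [List.drop_drop]; congr 1
        rw [pvParseL_some_none (xs := contents.drop pos) hi'
              (by rw [hdd]; convert h2 using 3)]
        rw [List.take_drop]
      · next j h2 =>
        have hb2 := pvFind_bounds h2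
        rw [pvFind_eq] at h1 h2
        simp only [Option.map_eq_some_iff] at h1 h2
        obtain ⟨i', hi', rfl⟩ := h1
        obtain ⟨j', hj', rfl⟩ := h2
        have hdd : (contents.drop pos).drop (i' + 1) = contents.drop (pos + i' + 1) := by
          rw [List.drop_drop]; congr 1
        rw [pvParseL_some_some (xs := contents.drop pos) hi'
              (by rw [hdd]; convert hj' using 3)]
        rw [ih (pos + i' + 1 + j' + 1) (by omega)]
        simp only [List.take_drop, List.getElem?_drop, List.drop_drop, Nat.add_assoc]

theorem pvParseGo_eq_parseL (contents : List String) (pos : Nat) :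
    pvParseGo contents pos = pvParseL (contents.drop pos) :=
  pvParseGo_eq_parseL_fuel contents contents.length pos (by omega)

-- main bridge: A's state machine equals render ∘ parse, given all bodies are known
theorem pvGo_eq (d : PySem.Dict String String) :
    ∀ (n : Nat) (xs : List String), xs.length ≤ n →
    (∀ b ∈ pvBodies xs, d.contains b = true) →
    pvAGo d xs none [] = pvRender d (pvParseL xs) := by
  intro n
  induction n with
  | zero =>
    intro xs hlen _
    have hx : xs = [] := List.length_eq_zero_iff.mp (Nat.le_zero.mp hlen)
    subst hx
    rw [pvParseL_none (xs := ([] : List String)) (by simp)]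
    simp [pvAGo, pvRender]
  | succ n ih =>
    intro xs hlen hpre
    cases xs with
    | nil =>
      rw [pvParseL_none (xs := ([] : List String)) (by simp)]
      simp [pvAGo, pvRender]
    | cons x rest =>
      by_cases hx : PySem.Str.isIn "enum /* @" x = true
      · -- marker line: parse takes the some-0 branch
        have h1 : (x :: rest).findIdx? (fun l => PySem.Str.isIn "enum /* @" l) = some 0 := by
          rw [List.findIdx?_cons, if_pos hx]
        rw [pvAGo.eq_def]
        dsimp only
        rw [if_pos hx, pvAGo_some]
        cases hb : rest.findIdx? (fun l => PySem.Str.isIn "}" l) with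
        | none =>
          rw [pvCollect_none rest [] hb]
          rw [pvParseL_some_none (xs := x :: rest) (i := 0) h1 (by simpa using hb)]
          rfl
        | some j =>
          rw [pvCollect_some rest j [] hb]
          rw [pvParseL_some_some (xs := x :: rest) (i := 0) (j := j) h1 (by simpa using hb)]
          simp only [List.take_zero, List.map_nil, List.nil_append, List.drop_succ_cons,
            List.getElem?_cons_zero, Option.getD_some, List.drop_one, List.drop_zero]
          rw [pvRender.eq_def]
          dsimp only
          cases hg : d.get? (PySem.Str.join "" ((rest.take j).map PySem.Str.strip)) with
          | none => rfl
          | some name =>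
            dsimp only
            simp only [List.drop_one]
            congr 1
            apply ih
            · rw [List.length_drop]
              simp only [List.length_cons] at hlen
              omega
            · intro b hbmem
              apply hpre
              rw [pvBodies_enum hx (pvCollect_some rest j [] hb)]
              exact List.mem_cons_of_mem _ hbmem
      · -- plain line
        rw [pvAGo.eq_def]
        dsimp only
        rw [if_neg hx, pvParseL_cons_not hx]
        have hrest : pvAGo d rest none [] = pvRender d (pvParseL rest) := by
          apply ih
          · simp only [List.length_cons] at hlen; omega
          · intro b hbmem
            apply hpre
            rw [pvBodies_notenum hx]
            exact hbmem
        rw [hrest]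
        simp [pvRender]

-- ===== VERDICT (by name: the statement is the Claim_ definition above) =====
theorem set_anonymous_enums_spec : Claim_equal_set_anonymous_enums := by
  intro contents enums _hdom hpre
  unfold Spec_set_anonymous_enums set_anonymous_enums set_anonymous_enums_alt
  rw [pvParseGo_eq_parseL contents 0]
  simpa using pvGo_eq _ contents.length contents (Nat.le_refl _) hpre
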